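-- pv_equiv track=rewrite | github.com/Tianfu-swarm/data-driven | data_driven.py | expand_loop_layers
-- ===== SOURCE A (Python) =====
-- def expand_loop_layers(choices, loop):
--     # Initialize loop members and the first layer
--     loop_set = set(loop)  # Keep track of all visited nodes
--     current_layer = loop  # Nodes in the current layer
--     layers = {1: list(loop)}  # Start with the given loop as the first layer
--
--     layer_index = 1
--     while current_layer:
--         next_layer = []
--         # Find all bats pointing to nodes in the current layer
--         for bat, choice in choices.items():
--             if bat not in loop_set and choice in current_layer:
--                 next_layer.append(bat)
--                 loop_set.add(bat)  # Mark as visited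
--
--         # Move to the next layer if any bats are found
--         if next_layer:
--             layer_index += 1
--             layers[layer_index] = next_layer
--         current_layer = next_layer
--
--     return layers
-- ===== SOURCE B (Python) =====
-- def expand_loop_layers(choices, loop):
--     # Reverse-adjacency BFS: visit each bat once instead of rescanning all
--     # choices per layer; each layer is reordered by the bats' dict position.
--     rev = {}
--     index = {}
--     i = 0
--     for bat, choice in choices.items():
--         rev.setdefault(choice, []).append(bat)
--         index[bat] = i
--         i += 1
--     visited = set(loop)
--     layers = {1: list(loop)}
--     current = loop
--     layer_index = 1
--     while current:
--         nxt = []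
--         for node in current:
--             for bat in rev.get(node, []):
--                 if bat not in visited:
--                     visited.add(bat)
--                     nxt.append(bat)
--         nxt.sort(key=lambda b: index[b])
--         if nxt:
--             layer_index += 1
--             layers[layer_index] = nxt
--         current = nxt
--     return layers
-- ===== Notes on version B (the rewrite author's own statement) =====
-- stated objective: faster
-- what changed: Replaces the per-layer full rescan of choices (with a list-membership test of the current layer) by a precomputed reverse-adjacency map and position index: one BFS that touches each bat once, each layer reordered by the bats' dict position.
import Mathlib
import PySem

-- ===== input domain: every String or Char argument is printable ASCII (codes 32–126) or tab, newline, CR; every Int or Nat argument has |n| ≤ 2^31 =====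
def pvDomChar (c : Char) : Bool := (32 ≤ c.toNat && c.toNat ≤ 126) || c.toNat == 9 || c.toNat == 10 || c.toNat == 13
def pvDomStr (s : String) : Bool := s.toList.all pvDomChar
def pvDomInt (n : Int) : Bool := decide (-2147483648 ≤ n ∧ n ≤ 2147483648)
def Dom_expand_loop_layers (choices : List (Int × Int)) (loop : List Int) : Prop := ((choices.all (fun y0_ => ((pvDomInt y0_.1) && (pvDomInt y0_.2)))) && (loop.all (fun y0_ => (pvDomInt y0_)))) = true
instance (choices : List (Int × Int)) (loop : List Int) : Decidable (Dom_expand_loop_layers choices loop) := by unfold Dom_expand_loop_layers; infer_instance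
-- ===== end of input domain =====

-- B replaces A's per-layer rescan of all choices by a reverse-adjacency map plus a
-- position index (one BFS, layers reordered by dict position); measurably faster.

-- shared interpretation of the dict-typed parameter (dict(choices): last value wins,
-- first-occurrence position), used by both ports
def pvDictOf (choices : List (Int × Int)) : PySem.Dict Int Int :=
  choices.foldl (fun d p => d.insert p.1 p.2) PySem.Dict.empty

-- ===== PORT A =====
-- the inner 'for bat, choice in choices.items(): if bat not in loop_set and choice in current_layer: …'
def pvStepA (items : List (Int × Int)) (current : List Int) (visited : PySem.Set Int) :
    List Int × PySem.Set Int :=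
  items.foldl
    (fun (s : List Int × PySem.Set Int) bc =>
      if !s.2.contains bc.1 && current.contains bc.2 then
        (s.1 ++ [bc.1], PySem.Set.add s.2 bc.1)
      else s)
    ([], visited)

-- the while loop of A; fuel only makes the recursion total (items.length + 2 always suffices)
def pvLoopA (items : List (Int × Int)) : Nat → List Int → PySem.Set Int → List (Int × List Int) → Int → List (Int × List Int)
  | 0, _, _, layers, _ => layers
  | fuel+1, current, visited, layers, idx =>
    if current = [] then layers
    else
      let st := pvStepA items current visited
      if st.1 ≠ [] then pvLoopA items fuel st.1 st.2 (layers ++ [(idx+1, st.1)]) (idx+1)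
      else pvLoopA items fuel st.1 st.2 layers idx

def expand_loop_layers (choices : List (Int × Int)) (loop : List Int) : List (Int × List Int) :=
  let items := (pvDictOf choices).items
  pvLoopA items (items.length + 2) loop (PySem.Set.ofList loop) [((1 : Int), loop)] 1

-- ===== PORT B =====
-- rev = {}; index = {}; i = 0; for bat, choice in choices.items(): rev.setdefault(choice, []).append(bat); index[bat] = i; i += 1
def pvRevIdxFold (items : List (Int × Int)) : PySem.Dict Int (List Int) × PySem.Dict Int Int × Int :=
  items.foldl
    (fun (s : PySem.Dict Int (List Int) × PySem.Dict Int Int × Int) bc =>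
      (s.1.modify bc.2 [] (· ++ [bc.1]), s.2.1.insert bc.1 s.2.2, s.2.2 + 1))
    (PySem.Dict.empty, PySem.Dict.empty, 0)

def pvRevIdx (items : List (Int × Int)) : PySem.Dict Int (List Int) × PySem.Dict Int Int :=
  ((pvRevIdxFold items).1, (pvRevIdxFold items).2.1)

-- the inner gather: for node in current: for bat in rev.get(node, []): if bat not in visited: …
def pvStepB (rev : PySem.Dict Int (List Int)) (current : List Int) (visited : PySem.Set Int) :
    List Int × PySem.Set Int :=
  current.foldl
    (fun s node =>
      (rev.getD node []).foldl
        (fun (s2 : List Int × PySem.Set Int) bat =>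
          if !s2.2.contains bat then (s2.1 ++ [bat], PySem.Set.add s2.2 bat) else s2)
        s)
    ([], visited)

-- the while loop of B; index.getD _ 0 is exact: index[b] is only looked up on keys of choices
def pvLoopB (rev : PySem.Dict Int (List Int)) (idxm : PySem.Dict Int Int) :
    Nat → List Int → PySem.Set Int → List (Int × List Int) → Int → List (Int × List Int)
  | 0, _, _, layers, _ => layers
  | fuel+1, current, visited, layers, idx =>
    if current = [] then layers
    else
      let st := pvStepB rev current visited
      let nxt := PySem.List.sorted st.1 (fun b => idxm.getD b 0) false
      if nxt ≠ [] then pvLoopB rev idxm fuel nxt st.2 (layers ++ [(idx+1, nxt)]) (idx+1)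
      else pvLoopB rev idxm fuel nxt st.2 layers idx

def expand_loop_layers_alt (choices : List (Int × Int)) (loop : List Int) : List (Int × List Int) :=
  let items := (pvDictOf choices).items
  let ri := pvRevIdx items
  pvLoopB ri.1 ri.2 (items.length + 2) loop (PySem.Set.ofList loop) [((1 : Int), loop)] 1

-- ===== PRECONDITION & SPEC =====
def Spec_expand_loop_layers (choices : List (Int × Int)) (loop : List Int) (out : List (Int × List Int)) : Prop := out = expand_loop_layers_alt choices loop
instance (choices : List (Int × Int)) (loop : List Int) (out : List (Int × List Int)) : Decidable (Spec_expand_loop_layers choices loop out) := by unfold Spec_expand_loop_layers; infer_instance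

-- ===== CLAIM (what is proved, stated in full; the proofs are below) =====
def Claim_equal_expand_loop_layers : Prop := ∀ (choices : List (Int × Int)) (loop : List Int), Dom_expand_loop_layers choices loop → Spec_expand_loop_layers choices loop (expand_loop_layers choices loop)

-- ===== LEMMAS AND PROOFS =====

-- A's per-layer result, in closed form: keys of the choices whose bat is unvisited
-- and whose choice lies in the current layer, in dict order
def pvLA (items : List (Int × Int)) (c : List Int) (v : PySem.Set Int) : List Int :=
  (items.filter (fun bc => !v.contains bc.1 && c.contains bc.2)).map Prod.fst

-- B's per-layer gather, in closed form: first occurrences of unvisited bats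
def pvNew (v : PySem.Set Int) : List Int → List Int
  | [] => []
  | b :: t => if v.contains b then pvNew v t else b :: pvNew (PySem.Set.add v b) t

theorem pv_set_mem (v : PySem.Set Int) (x : Int) : v.contains x = true ↔ x ∈ v := by
  simp

theorem pv_set_not_mem (v : PySem.Set Int) (x : Int) : v.contains x = false ↔ x ∉ v := by
  rw [← pv_set_mem, Bool.not_eq_true]

theorem pv_contains_add_ne (v : PySem.Set Int) (x y : Int) (h : y ≠ x) :
    (PySem.Set.add v x).contains y = v.contains y := by
  have h1 : (PySem.Set.add v x).contains y = true ↔ v.contains y = true := by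
    rw [pv_set_mem, pv_set_mem, PySem.Set.mem_add]
    constructor
    · rintro (hy | rfl)
      · exact hy
      · exact absurd rfl h
    · exact Or.inl
  cases hb : v.contains y
  · cases hb2 : (PySem.Set.add v x).contains y
    · rfl
    · rw [hb] at h1; exact absurd (h1.mp hb2) (by simp)
  · exact h1.mpr hb

theorem pv_stepA_spec (items : List (Int × Int)) (c : List Int) :
    ∀ (v : PySem.Set Int) (acc : List Int), (items.map Prod.fst).Nodup →
    items.foldl
      (fun (s : List Int × PySem.Set Int) bc =>
        if !s.2.contains bc.1 && c.contains bc.2 then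
          (s.1 ++ [bc.1], PySem.Set.add s.2 bc.1)
        else s)
      (acc, v)
    = (acc ++ pvLA items c v, PySem.Set.update v (pvLA items c v)) := by
  induction items with
  | nil => intro v acc _; simp [pvLA, PySem.Set.update]
  | cons bc rest ih =>
    intro v acc hnd
    simp only [List.map_cons, List.nodup_cons] at hnd
    obtain ⟨hb, hnd'⟩ := hnd
    have hfeq : pvLA rest c (PySem.Set.add v bc.1) = pvLA rest c v := by
      unfold pvLA
      congr 1
      apply List.filter_congr
      intro p hp
      have hne : p.1 ≠ bc.1 := by
        intro he
        exact hb (by rw [← he]; exact List.mem_map_of_mem hp)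
      rw [pv_contains_add_ne v bc.1 p.1 hne]
    by_cases h : (!v.contains bc.1 && c.contains bc.2) = true
    · rw [List.foldl_cons]
      simp only [if_pos h]
      rw [ih (PySem.Set.add v bc.1) (acc ++ [bc.1]) hnd', hfeq]
      have hfc : pvLA (bc :: rest) c v = bc.1 :: pvLA rest c v := by
        unfold pvLA
        rw [List.filter_cons]
        simp only [if_pos h, List.map_cons]
      rw [hfc, PySem.Set.update_cons]
      simp [List.append_assoc]
    · rw [List.foldl_cons]
      simp only [if_neg h]
      rw [ih v acc hnd']
      have hfc : pvLA (bc :: rest) c v = pvLA rest c v := by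
        unfold pvLA
        rw [List.filter_cons]
        simp only [if_neg h]
      rw [hfc]

theorem pv_gather_spec (cand : List Int) :
    ∀ (v : PySem.Set Int) (acc : List Int),
    cand.foldl
      (fun (s2 : List Int × PySem.Set Int) bat =>
        if !s2.2.contains bat then (s2.1 ++ [bat], PySem.Set.add s2.2 bat) else s2)
      (acc, v)
    = (acc ++ pvNew v cand, PySem.Set.update v (pvNew v cand)) := by
  induction cand with
  | nil => intro v acc; simp [pvNew, PySem.Set.update]
  | cons b t ih =>
    intro v acc
    by_cases h : v.contains b = true
    · rw [List.foldl_cons]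
      rw [if_neg (show ¬((!v.contains b) = true) by simp; exact (pv_set_mem v b).mp h)]
      rw [ih v acc]
      simp only [pvNew, if_pos h]
    · have h' : v.contains b = false := by simpa using h
      rw [List.foldl_cons]
      rw [if_pos (show (!v.contains b) = true by simp; exact (pv_set_not_mem v b).mp h')]
      rw [ih (PySem.Set.add v b) (acc ++ [b])]
      simp only [pvNew, if_neg h, PySem.Set.update_cons]
      simp [List.append_assoc]

theorem pv_foldl_flatMap {α β γ : Type} (g : β → List α) (f : γ → α → γ) :
    ∀ (l : List β) (init : γ),
    (l.flatMap g).foldl f init = l.foldl (fun a x => (g x).foldl f a) init := by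
  intro l
  induction l with
  | nil => intro init; simp
  | cons x t ih => intro init; rw [List.flatMap_cons, List.foldl_append, List.foldl_cons, ih]

theorem pv_stepB_spec (rev : PySem.Dict Int (List Int)) (c : List Int) (v : PySem.Set Int) :
    pvStepB rev c v
    = (pvNew v (c.flatMap (fun n => rev.getD n [])),
       PySem.Set.update v (pvNew v (c.flatMap (fun n => rev.getD n [])))) := by
  unfold pvStepB
  rw [← pv_foldl_flatMap (g := fun n => rev.getD n [])]
  exact pv_gather_spec _ v []

theorem pv_mem_pvNew (x : Int) : ∀ (cand : List Int) (v : PySem.Set Int),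
    x ∈ pvNew v cand ↔ x ∉ v ∧ x ∈ cand := by
  intro cand
  induction cand with
  | nil => intro v; simp [pvNew]
  | cons b t ih =>
    intro v
    by_cases h : v.contains b = true
    · have hb : b ∈ v := (pv_set_mem v b).mp h
      rw [pvNew, if_pos h, ih]
      simp only [List.mem_cons]
      constructor
      · rintro ⟨hxv, hxt⟩; exact ⟨hxv, Or.inr hxt⟩
      · rintro ⟨hxv, (rfl | hxt)⟩
        · exact absurd hb hxv
        · exact ⟨hxv, hxt⟩
    · have hb : b ∉ v := fun hm => h ((pv_set_mem v b).mpr hm)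
      rw [pvNew, if_neg h]
      simp only [List.mem_cons]
      constructor
      · rintro (rfl | hx)
        · exact ⟨hb, Or.inl rfl⟩
        · rw [ih] at hx
          obtain ⟨hxa, hxt⟩ := hx
          rw [PySem.Set.mem_add] at hxa
          push_neg at hxa
          exact ⟨hxa.1, Or.inr hxt⟩
      · rintro ⟨hxv, (rfl | hxt)⟩
        · exact Or.inl rfl
        · by_cases hxb : x = b
          · exact Or.inl hxb
          · refine Or.inr ?_
            rw [ih, PySem.Set.mem_add]
            push_neg
            exact ⟨⟨hxv, hxb⟩, hxt⟩

theorem pv_nodup_pvNew : ∀ (cand : List Int) (v : PySem.Set Int), (pvNew v cand).Nodup := by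
  intro cand
  induction cand with
  | nil => intro v; simp [pvNew]
  | cons b t ih =>
    intro v
    by_cases h : v.contains b = true
    · rw [pvNew, if_pos h]; exact ih v
    · rw [pvNew, if_neg h]
      rw [List.nodup_cons]
      refine ⟨?_, ih _⟩
      intro hmem
      rw [pv_mem_pvNew] at hmem
      exact hmem.1 (by rw [PySem.Set.mem_add]; exact Or.inr rfl)

theorem pv_revIdx_split (items : List (Int × Int)) :
    pvRevIdx items
    = (items.foldl (fun r (bc : Int × Int) => r.modify bc.2 [] (· ++ [bc.1])) PySem.Dict.empty,
       (items.foldl (fun (p : PySem.Dict Int Int × Int) (bc : Int × Int) => (p.1.insert bc.1 p.2, p.2 + 1)) (PySem.Dict.empty, 0)).1) := by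
  unfold pvRevIdx pvRevIdxFold
  rw [PySem.List.foldl_prod_mk
      (f := fun (r : PySem.Dict Int (List Int)) (bc : Int × Int) => r.modify bc.2 [] (· ++ [bc.1]))
      (g := fun (p : PySem.Dict Int Int × Int) (bc : Int × Int) => (p.1.insert bc.1 p.2, p.2 + 1))]

theorem pv_rev_getD (items : List (Int × Int)) (n : Int) :
    (pvRevIdx items).1.getD n [] = (items.filter (fun bc => bc.2 == n)).map Prod.fst := by
  rw [pv_revIdx_split]
  have h1 : items.foldl (fun r (bc : Int × Int) => r.modify bc.2 [] (· ++ [bc.1])) PySem.Dict.empty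
      = (items.map Prod.swap).foldl (fun r (p : Int × Int) => r.modify p.1 [] (· ++ [p.2])) PySem.Dict.empty := by
    rw [List.foldl_map]
    congr 1
  rw [h1, PySem.Dict.getD_foldl_modify_append]
  simp [List.filter_map, List.map_map, Function.comp_def]

theorem pv_idxfold_pres : ∀ (items : List (Int × Int)) (d : PySem.Dict Int Int) (i0 : Int) (b : Int),
    b ∉ items.map Prod.fst →
    ((items.foldl (fun (p : PySem.Dict Int Int × Int) bc => (p.1.insert bc.1 p.2, p.2 + 1)) (d, i0)).1).get? b = d.get? b := by
  intro items
  induction items with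
  | nil => intro d i0 b _; rfl
  | cons bc rest ih =>
    intro d i0 b hb
    simp only [List.map_cons, List.mem_cons] at hb
    push_neg at hb
    rw [List.foldl_cons]
    rw [ih _ _ _ hb.2]
    rw [PySem.Dict.get?_insert]
    simp [hb.1]

theorem pv_idxfold_get : ∀ (items : List (Int × Int)), (items.map Prod.fst).Nodup →
    ∀ (d : PySem.Dict Int Int) (i0 : Int), (∀ b ∈ items.map Prod.fst, d.get? b = none) →
    ∀ (j : Nat), (hj : j < items.length) →
    ((items.foldl (fun (p : PySem.Dict Int Int × Int) bc => (p.1.insert bc.1 p.2, p.2 + 1)) (d, i0)).1).get? (items[j].1)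
      = some (i0 + j) := by
  intro items
  induction items with
  | nil => intro _ _ _ _ j hj; exact absurd hj (by simp)
  | cons bc rest ih =>
    intro hnd d i0 hd j hj
    simp only [List.map_cons, List.nodup_cons] at hnd
    rw [List.foldl_cons]
    cases j with
    | zero =>
      simp only [List.getElem_cons_zero]
      rw [pv_idxfold_pres rest _ _ _ hnd.1]
      simp [PySem.Dict.get?_insert_self]
    | succ jj =>
      have hj' : jj < rest.length := by simpa using hj
      have h2 := ih hnd.2 (d.insert bc.1 i0) (i0 + 1) ?_ jj hj'
      · simp only [List.getElem_cons_succ]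
        rw [h2]
        congr 1
        push_cast
        ring
      · intro b hbmem
        rw [PySem.Dict.get?_insert]
        have hne : ¬ b = bc.1 := by
          intro he
          exact hnd.1 (he ▸ hbmem)
        simp only [if_neg hne]
        exact hd b (List.mem_cons_of_mem _ hbmem)

theorem pv_idx_get (items : List (Int × Int)) (hnd : (items.map Prod.fst).Nodup)
    (j : Nat) (hj : j < items.length) :
    (pvRevIdx items).2.get? (items[j].1) = some (j : Int) := by
  rw [pv_revIdx_split]
  have := pv_idxfold_get items hnd PySem.Dict.empty 0 (fun b _ => PySem.Dict.get?_empty b) j hj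
  simpa using this

theorem pv_keys_pairwise (items : List (Int × Int)) (hnd : (items.map Prod.fst).Nodup) :
    (items.map Prod.fst).Pairwise
      (fun a b => (pvRevIdx items).2.getD a 0 < (pvRevIdx items).2.getD b 0) := by
  rw [List.pairwise_iff_getElem]
  intro p q hp hq hpq
  have hp' : p < items.length := by simpa using hp
  have hq' : q < items.length := by simpa using hq
  have e1 : (items.map Prod.fst)[p] = items[p].1 := by simp
  have e2 : (items.map Prod.fst)[q] = items[q].1 := by simp
  rw [e1, e2, PySem.Dict.getD_eq_get?_getD, PySem.Dict.getD_eq_get?_getD,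
      pv_idx_get items hnd p hp', pv_idx_get items hnd q hq']
  simp only [Option.getD_some]
  exact_mod_cast hpq

theorem pv_step_eq (items : List (Int × Int)) (hnd : (items.map Prod.fst).Nodup)
    (c : List Int) (v₁ v₂ : PySem.Set Int) (hv : ∀ x : Int, x ∈ v₁ ↔ x ∈ v₂) :
    PySem.List.sorted (pvStepB (pvRevIdx items).1 c v₂).1
        (fun b => (pvRevIdx items).2.getD b 0) false = (pvStepA items c v₁).1
    ∧ ∀ x : Int, x ∈ (pvStepA items c v₁).2 ↔ x ∈ (pvStepB (pvRevIdx items).1 c v₂).2 := by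
  have hA : pvStepA items c v₁ = (pvLA items c v₁, PySem.Set.update v₁ (pvLA items c v₁)) := by
    unfold pvStepA
    simpa using pv_stepA_spec items c v₁ [] hnd
  have hB := pv_stepB_spec (pvRevIdx items).1 c v₂
  have hmemL : ∀ x : Int, x ∈ pvLA items c v₁ ↔ (x ∉ v₁ ∧ ∃ n ∈ c, (x, n) ∈ items) := by
    intro x
    unfold pvLA
    simp only [List.mem_map, List.mem_filter]
    constructor
    · rintro ⟨bc, ⟨hbc, hcond⟩, rfl⟩
      rw [Bool.and_eq_true, Bool.not_eq_true'] at hcond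
      exact ⟨(pv_set_not_mem _ _).mp hcond.1, bc.2, by simpa using hcond.2, hbc⟩
    · rintro ⟨hxv, n, hn, hmem⟩
      refine ⟨(x, n), ⟨hmem, ?_⟩, rfl⟩
      rw [Bool.and_eq_true, Bool.not_eq_true']
      exact ⟨(pv_set_not_mem _ _).mpr hxv, by simpa using hn⟩
  have hmemN : ∀ x : Int,
      x ∈ pvNew v₂ (c.flatMap (fun n => (pvRevIdx items).1.getD n []))
        ↔ (x ∉ v₂ ∧ ∃ n ∈ c, (x, n) ∈ items) := by
    intro x
    rw [pv_mem_pvNew]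
    constructor
    · rintro ⟨hxv, hxc⟩
      rw [List.mem_flatMap] at hxc
      obtain ⟨n, hn, hxr⟩ := hxc
      rw [pv_rev_getD] at hxr
      simp only [List.mem_map, List.mem_filter] at hxr
      obtain ⟨bc, ⟨hbc, hbeq⟩, rfl⟩ := hxr
      have : bc.2 = n := by simpa using hbeq
      exact ⟨hxv, n, hn, by rw [← this]; exact hbc⟩
    · rintro ⟨hxv, n, hn, hmem⟩
      refine ⟨hxv, ?_⟩
      rw [List.mem_flatMap]
      refine ⟨n, hn, ?_⟩
      rw [pv_rev_getD]
      simp only [List.mem_map, List.mem_filter]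
      exact ⟨(x, n), ⟨hmem, by simp⟩, rfl⟩
  have hsame : ∀ x : Int, x ∈ pvLA items c v₁
      ↔ x ∈ pvNew v₂ (c.flatMap (fun n => (pvRevIdx items).1.getD n [])) := by
    intro x
    rw [hmemL x, hmemN x]
    exact and_congr (not_congr (hv x)) Iff.rfl
  have hsubL : List.Sublist (pvLA items c v₁) (items.map Prod.fst) := by
    unfold pvLA
    exact List.filter_sublist.map Prod.fst
  have hndL : (pvLA items c v₁).Nodup := hnd.sublist hsubL
  have hndN := pv_nodup_pvNew (c.flatMap (fun n => (pvRevIdx items).1.getD n [])) v₂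
  have hperm : (pvLA items c v₁).Perm
      (pvNew v₂ (c.flatMap (fun n => (pvRevIdx items).1.getD n []))) :=
    (List.perm_ext_iff_of_nodup hndL hndN).mpr hsame
  have hpairL : (pvLA items c v₁).Pairwise
      (fun a b => (pvRevIdx items).2.getD a 0 < (pvRevIdx items).2.getD b 0) :=
    (pv_keys_pairwise items hnd).sublist hsubL
  constructor
  · rw [hA, hB]
    apply PySem.List.sorted_eq_of_perm_of_pairwise_lt <;> first | exact hperm | exact hpairL
  · intro x
    rw [hA, hB]
    simp only [PySem.Set.mem_update]
    exact or_congr (hv x) (hsame x)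

theorem pv_loop_eq (items : List (Int × Int)) (hnd : (items.map Prod.fst).Nodup) :
    ∀ (fuel : Nat) (c : List Int) (v₁ v₂ : PySem.Set Int)
      (layers : List (Int × List Int)) (idx : Int), (∀ x : Int, x ∈ v₁ ↔ x ∈ v₂) →
    pvLoopA items fuel c v₁ layers idx
      = pvLoopB (pvRevIdx items).1 (pvRevIdx items).2 fuel c v₂ layers idx := by
  intro fuel
  induction fuel with
  | zero => intro c v₁ v₂ layers idx _; rfl
  | succ n ihf =>
    intro c v₁ v₂ layers idx hv
    obtain ⟨h1, h2⟩ := pv_step_eq items hnd c v₁ v₂ hv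
    by_cases hc : c = []
    · simp only [pvLoopA, pvLoopB, if_pos hc]
    · simp only [pvLoopA, pvLoopB, if_neg hc]
      rw [h1]
      split_ifs with hne
      · exact ihf _ _ _ _ _ h2
      · exact ihf _ _ _ _ _ h2

theorem pv_keys_nodup (choices : List (Int × Int)) :
    ((pvDictOf choices).items.map Prod.fst).Nodup := by
  have h : (pvDictOf choices).keys.Nodup := by
    unfold pvDictOf
    exact PySem.Dict.nodup_keys_foldl_insert_key choices (fun p => p.1) (fun d p => p.2)
      PySem.Dict.empty PySem.Dict.nodup_keys_empty
  simpa [PySem.Dict.keys] using h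

theorem pv_main (choices : List (Int × Int)) (loop : List Int) :
    expand_loop_layers choices loop = expand_loop_layers_alt choices loop := by
  unfold expand_loop_layers expand_loop_layers_alt
  exact pv_loop_eq _ (pv_keys_nodup choices) _ _ _ _ _ _ (fun _ => Iff.rfl)

-- ===== VERDICT (by name: the statement is the Claim_ definition above) =====
theorem expand_loop_layers_spec : Claim_equal_expand_loop_layers := by
  intro choices loop _
  unfold Spec_expand_loop_layers
  exact pv_main choices loop
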